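-- pv_equiv track=rewrite | github.com/KaifYang/Bioinformatics-Algorithms | Chapter6/TwoBreakDistance.py | ColoredEdges
-- ===== SOURCE A (Python) =====
-- def ChromosomeToCycle(Chromosome):
--     Nodes = [None] * (len(Chromosome)*2)
--
--     #j is the index on the chromosome
--     for j in range(1, len(Chromosome)+1):
--         i = Chromosome[j-1]
--
--         if i > 0:
--             Nodes[(2*j-1) - 1] = 2*i - 1
--             Nodes[(2*j) - 1] = 2*i
--
--         #since i < 0 we need to reverse its sign to make the indexing work
--         else:
--             Nodes[(2*j-1) - 1] = -(2*i)
--             Nodes[(2*j) - 1] = -(2*i) - 1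
--
--     return Nodes
--
-- def ColoredEdges(P):
--     edges = []
--
--     for chr in P:
--         Nodes = ChromosomeToCycle(chr)
--
--         for j in range(1, len(chr)+1):
--             if j == len(chr):
--                 edges.append((Nodes[(2*j) - 1], Nodes[0]))
--             else:
--                 edges.append((Nodes[(2*j) - 1], Nodes[(2*j+1) - 1]))
--
--     return edges
--
-- P = []
-- ===== SOURCE B (Python) =====
-- def ColoredEdges(P):
--     def tail(g):
--         return 2 * g if g > 0 else -2 * g - 1
--
--     def head(g):
--         return 2 * g - 1 if g > 0 else -2 * g
--
--     edges = []
--     for c in P: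
--         edges.extend((tail(a), head(b)) for a, b in zip(c, c[1:] + c[:1]))
--     return edges
-- ===== Notes on version B (the rewrite author's own statement) =====
-- stated objective: simpler
-- what changed: B has no node array and no indexing at all: it zips each chromosome with its rotation by one (c[1:]+c[:1]) and maps each adjacent gene pair (a,b) directly to the edge (tail(a), head(b)), so A's ChromosomeToCycle array, position arithmetic and special last-iteration branch all disappear.
import Mathlib
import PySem

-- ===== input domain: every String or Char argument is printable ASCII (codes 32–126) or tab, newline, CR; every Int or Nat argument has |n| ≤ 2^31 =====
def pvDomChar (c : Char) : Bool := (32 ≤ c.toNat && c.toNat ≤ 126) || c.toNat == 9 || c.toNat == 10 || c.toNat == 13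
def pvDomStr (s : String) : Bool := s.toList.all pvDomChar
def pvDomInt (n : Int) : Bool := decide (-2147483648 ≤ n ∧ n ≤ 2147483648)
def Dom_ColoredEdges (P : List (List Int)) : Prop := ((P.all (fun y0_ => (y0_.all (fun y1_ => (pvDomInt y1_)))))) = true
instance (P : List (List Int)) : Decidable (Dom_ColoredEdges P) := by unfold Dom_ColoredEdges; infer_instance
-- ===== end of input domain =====

-- B replaces A's node array + indexed loop by zipping each chromosome with its rotation by one and mapping gene pairs to edges (objective: simpler).


-- ===== PORT A =====
-- Python's Nodes = [None]*(2n) is modelled as replicate (2n) 0: the loop writes every slot before any slot is read.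
def ChromosomeToCycle (c : List Int) : List Int :=
  (PySem.List.pyRange 1 ((c.length : Int) + 1) 1).foldl
    (fun ns j =>
      let i := PySem.List.pyGetD c (j - 1) 0
      if i > 0 then
        PySem.List.pySetD (PySem.List.pySetD ns (2*j - 1 - 1) (2*i - 1)) (2*j - 1) (2*i)
      else
        PySem.List.pySetD (PySem.List.pySetD ns (2*j - 1 - 1) (-(2*i))) (2*j - 1) (-(2*i) - 1))
    (List.replicate (c.length * 2) 0)

def ColoredEdges (P : List (List Int)) : List (Int × Int) :=
  P.foldl
    (fun edges c =>
      let nodes := ChromosomeToCycle c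
      (PySem.List.pyRange 1 ((c.length : Int) + 1) 1).foldl
        (fun edges j =>
          if j = (c.length : Int) then
            edges ++ [(PySem.List.pyGetD nodes (2*j - 1) 0, PySem.List.pyGetD nodes 0 0)]
          else
            edges ++ [(PySem.List.pyGetD nodes (2*j - 1) 0, PySem.List.pyGetD nodes (2*j + 1 - 1) 0)])
        edges)
    []

-- ===== PORT B =====
def pvTail (g : Int) : Int := if g > 0 then 2*g else -(2*g) - 1
def pvHead (g : Int) : Int := if g > 0 then 2*g - 1 else -(2*g)

-- c[1:] = c.drop 1, c[:1] = c.take 1; edges.extend(... zip ...) = append of the mapped zip.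
def ColoredEdges_alt (P : List (List Int)) : List (Int × Int) :=
  P.foldl
    (fun edges c =>
      edges ++ (c.zip (c.drop 1 ++ c.take 1)).map (fun p => (pvTail p.1, pvHead p.2)))
    []

-- ===== PRECONDITION & SPEC =====
def Spec_ColoredEdges (P : List (List Int)) (out : List (Int × Int)) : Prop := out = ColoredEdges_alt P
instance (P : List (List Int)) (out : List (Int × Int)) : Decidable (Spec_ColoredEdges P out) := by unfold Spec_ColoredEdges; infer_instance

-- ===== CLAIM (what is proved, stated in full; the proofs are below) =====
def Claim_equal_ColoredEdges : Prop := ∀ (P : List (List Int)), Dom_ColoredEdges P → Spec_ColoredEdges P (ColoredEdges P)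

-- ===== LEMMAS AND PROOFS =====

-- The flat endpoint list that A's Nodes array holds after its first loop.
def pvFlat (c : List Int) : List Int := c.flatMap (fun i => [pvHead i, pvTail i])

lemma pvFlat_length (c : List Int) : (pvFlat c).length = c.length * 2 := by
  induction c with
  | nil => rfl
  | cons x t ih => simp [pvFlat] at ih ⊢; omega

lemma pvFlat_append (c : List Int) (a : Int) :
    pvFlat (c ++ [a]) = pvFlat c ++ [pvHead a, pvTail a] := by
  simp [pvFlat]

lemma cyc_aux (c : List Int) (pad : Nat) :
    (PySem.List.pyRange 1 ((c.length : Int) + 1) 1).foldl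
      (fun ns j =>
        let i := PySem.List.pyGetD c (j - 1) 0
        if i > 0 then
          PySem.List.pySetD (PySem.List.pySetD ns (2*j - 1 - 1) (2*i - 1)) (2*j - 1) (2*i)
        else
          PySem.List.pySetD (PySem.List.pySetD ns (2*j - 1 - 1) (-(2*i))) (2*j - 1) (-(2*i) - 1))
      (List.replicate (c.length * 2 + pad) 0)
    = pvFlat c ++ List.replicate pad 0 := by
  induction c using List.reverseRecOn generalizing pad with
  | nil => simp [pvFlat, PySem.List.pyRange_one_eq_nil]
  | append_singleton t a ih =>
    have hlen : ((t ++ [a]).length : Int) = (t.length : Int) + 1 := by simp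
    rw [hlen, PySem.List.pyRange_one_succ_right (by omega), List.foldl_append]
    have hcongr : (PySem.List.pyRange 1 ((t.length : Int) + 1) 1).foldl
        (fun ns j =>
          let i := PySem.List.pyGetD (t ++ [a]) (j - 1) 0
          if i > 0 then
            PySem.List.pySetD (PySem.List.pySetD ns (2*j - 1 - 1) (2*i - 1)) (2*j - 1) (2*i)
          else
            PySem.List.pySetD (PySem.List.pySetD ns (2*j - 1 - 1) (-(2*i))) (2*j - 1) (-(2*i) - 1))
        (List.replicate ((t ++ [a]).length * 2 + pad) 0)
      = (PySem.List.pyRange 1 ((t.length : Int) + 1) 1).foldl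
        (fun ns j =>
          let i := PySem.List.pyGetD t (j - 1) 0
          if i > 0 then
            PySem.List.pySetD (PySem.List.pySetD ns (2*j - 1 - 1) (2*i - 1)) (2*j - 1) (2*i)
          else
            PySem.List.pySetD (PySem.List.pySetD ns (2*j - 1 - 1) (-(2*i))) (2*j - 1) (-(2*i) - 1))
        (List.replicate (t.length * 2 + (pad + 2)) 0) := by
      have hsz : (t ++ [a]).length * 2 + pad = t.length * 2 + (pad + 2) := by simp; omega
      rw [hsz]
      apply PySem.List.foldl_congr_mem
      intro acc j hj
      have hj' := (PySem.List.mem_pyRange_one).1 hj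
      have hread : PySem.List.pyGetD (t ++ [a]) (j - 1) 0 = PySem.List.pyGetD t (j - 1) 0 := by
        have h0 : (0:Int) ≤ j - 1 := by omega
        rw [PySem.List.pyGetD_of_nonneg (h := h0), PySem.List.pyGetD_of_nonneg (h := h0)]
        have hlt : (j-1).toNat < t.length := by omega
        rw [List.getD_append _ _ _ _ hlt]
      simp only [hread]
    rw [hcongr, ih (pad + 2)]
    simp only [List.foldl_cons, List.foldl_nil]
    have e0 : ((t.length : Int) + 1 - 1) = (t.length : Int) := by ring
    have hread : PySem.List.pyGetD (t ++ [a]) ((t.length : Int) + 1 - 1) 0 = a := by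
      rw [e0, PySem.List.pyGetD_natCast]
      simp
    have e1 : ((t.length * 2 + 1 : Nat) : Int) - 1 = ((t.length * 2 : Nat) : Int) := by push_cast; ring
    have e2 : (2*((t.length : Int) + 1) - 1) = ((t.length * 2 + 1 : Nat) : Int) := by push_cast; ring
    have hrep : List.replicate (pad + 2) (0 : Int) = 0 :: 0 :: List.replicate pad 0 := rfl
    have hL : (pvFlat t).length = t.length * 2 := pvFlat_length t
    simp only [hread, e2, e1, PySem.List.pySetD_natCast, hrep, pvFlat_append (c := t) (a := a)]
    split_ifs with hpos <;>
    · rw [List.set_append_right _ _ (by omega), List.set_append_right _ _ (by omega)]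
      simp [hL, pvHead, pvTail, hpos]

lemma cyc_eq (c : List Int) : ChromosomeToCycle c = pvFlat c := by
  have h := cyc_aux c 0
  simpa [ChromosomeToCycle] using h

lemma pvFlat_getD_head (c : List Int) (k : Nat) (hk : k < c.length) :
    (pvFlat c).getD (2*k) 0 = pvHead (c.getD k 0) := by
  induction c generalizing k with
  | nil => simp at hk
  | cons x t ih =>
    cases k with
    | zero => simp [pvFlat]
    | succ m =>
      have := ih m (by simpa using hk)
      simpa [pvFlat, show 2*(m+1) = (2*m)+1+1 by ring] using this

lemma pvFlat_getD_tail (c : List Int) (k : Nat) (hk : k < c.length) :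
    (pvFlat c).getD (2*k + 1) 0 = pvTail (c.getD k 0) := by
  induction c generalizing k with
  | nil => simp at hk
  | cons x t ih =>
    cases k with
    | zero => simp [pvFlat]
    | succ m =>
      have := ih m (by simpa using hk)
      simpa [pvFlat, show 2*(m+1)+1 = (2*m+1)+1+1 by ring] using this

-- B's per-chromosome edge list, and its index characterisation.
def pvBchr (c : List Int) : List (Int × Int) :=
  (c.zip (c.drop 1 ++ c.take 1)).map (fun p => (pvTail p.1, pvHead p.2))

lemma pvBchr_range (c : List Int) :
    pvBchr c = (List.range c.length).map
      (fun k => (pvTail (c.getD k 0), pvHead (c.getD ((k + 1) % c.length) 0))) := by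
  cases c with
  | nil => rfl
  | cons x t =>
    apply List.ext_getElem
    · simp [pvBchr]
    intro k hk1 hk2
    have hk : k < t.length + 1 := by
      simpa [pvBchr] using hk1
    have hrot : (t ++ [x])[k]'(by simp; omega) = (x :: t).getD ((k + 1) % (t.length + 1)) 0 := by
      by_cases hlt : k < t.length
      · rw [List.getElem_append_left hlt]
        have hmod : (k + 1) % (t.length + 1) = k + 1 := Nat.mod_eq_of_lt (by omega)
        rw [hmod]
        have hb : k + 1 < (x :: t).length := by simp; omega
        simp [List.getD_eq_getElem?_getD, List.getElem?_eq_getElem hb]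
      · have hke : k = t.length := by omega
        subst hke
        rw [List.getElem_append_right (by omega)]
        have hmod : (t.length + 1) % (t.length + 1) = 0 := Nat.mod_self _
        simp [hmod]
    simp only [pvBchr, List.getElem_map, List.getElem_zip, List.getElem_range,
      List.drop_succ_cons, List.drop_zero, List.take_succ_cons, List.take_zero,
      List.length_cons, hrot]
    have hself : (x :: t).getD k 0 = (x :: t)[k]'(by simpa using hk) := by
      simp [List.getD_eq_getElem?_getD, List.getElem?_eq_getElem (show k < (x::t).length by simpa using hk)]
    rw [hself]

lemma inner_eq' (c : List Int) (edges : List (Int × Int)) :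
    (PySem.List.pyRange 1 ((c.length : Int) + 1) 1).foldl
      (fun edges j =>
        if j = (c.length : Int) then
          edges ++ [(PySem.List.pyGetD (pvFlat c) (2*j - 1) 0,
                     PySem.List.pyGetD (pvFlat c) 0 0)]
        else
          edges ++ [(PySem.List.pyGetD (pvFlat c) (2*j - 1) 0,
                     PySem.List.pyGetD (pvFlat c) (2*j + 1 - 1) 0)])
      edges
    = edges ++ pvBchr c := by
  have hstep : ∀ (acc : List (Int × Int)) (j : Int), j ∈ PySem.List.pyRange 1 ((c.length : Int) + 1) 1 →
      (if j = (c.length : Int) then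
          acc ++ [(PySem.List.pyGetD (pvFlat c) (2*j - 1) 0, PySem.List.pyGetD (pvFlat c) 0 0)]
        else
          acc ++ [(PySem.List.pyGetD (pvFlat c) (2*j - 1) 0, PySem.List.pyGetD (pvFlat c) (2*j + 1 - 1) 0)])
      = acc ++ [(PySem.List.pyGetD (pvFlat c) (2*j - 1) 0,
                 if j = (c.length : Int) then PySem.List.pyGetD (pvFlat c) 0 0
                 else PySem.List.pyGetD (pvFlat c) (2*j + 1 - 1) 0)] := by
    intro acc j _; split_ifs <;> rfl
  rw [PySem.List.foldl_congr_mem _ _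
        (fun acc j => acc ++ [(PySem.List.pyGetD (pvFlat c) (2*j - 1) 0,
           if j = (c.length : Int) then PySem.List.pyGetD (pvFlat c) 0 0
           else PySem.List.pyGetD (pvFlat c) (2*j + 1 - 1) 0)]) edges hstep,
      PySem.List.foldl_append_singleton_eq_map]
  congr 1
  rw [PySem.List.pyRange_one]
  have hn : (((c.length : Int) + 1 - 1)).toNat = c.length := by omega
  rw [hn, List.map_map, pvBchr_range]
  apply List.map_congr_left
  intro k hk
  have hk' : k < c.length := List.mem_range.mp hk
  have efst : (2*((1 : Int) + k) - 1) = ((2*k + 1 : Nat) : Int) := by push_cast; ring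
  have esnd : (2*((1 : Int) + k) + 1 - 1) = ((2*(k+1) : Nat) : Int) := by push_cast; ring
  simp only [Function.comp_apply, efst, esnd, PySem.List.pyGetD_natCast]
  by_cases hlast : k + 1 = c.length
  · have hcond : (1 : Int) + k = (c.length : Int) := by omega
    have hmod : (k + 1) % c.length = 0 := by rw [hlast]; exact Nat.mod_self _
    rw [if_pos hcond, hmod]
    have h0 : (PySem.List.pyGetD (pvFlat c) 0 0) = (pvFlat c).getD 0 0 := by
      simpa using PySem.List.pyGetD_natCast (xs := pvFlat c) (n := 0) (d := 0)
    rw [h0]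
    have := pvFlat_getD_head c 0 (by omega)
    simp only [Nat.mul_zero] at this
    rw [pvFlat_getD_tail c k hk', this]
  · have hcond : ¬ ((1 : Int) + k = (c.length : Int)) := by omega
    have hmod : (k + 1) % c.length = k + 1 := Nat.mod_eq_of_lt (by omega)
    rw [if_neg hcond, hmod]
    rw [pvFlat_getD_tail c k hk', pvFlat_getD_head c (k+1) (by omega)]

lemma inner_eq (c : List Int) (edges : List (Int × Int)) :
    (PySem.List.pyRange 1 ((c.length : Int) + 1) 1).foldl
      (fun edges j =>
        if j = (c.length : Int) then
          edges ++ [(PySem.List.pyGetD (ChromosomeToCycle c) (2*j - 1) 0,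
                     PySem.List.pyGetD (ChromosomeToCycle c) 0 0)]
        else
          edges ++ [(PySem.List.pyGetD (ChromosomeToCycle c) (2*j - 1) 0,
                     PySem.List.pyGetD (ChromosomeToCycle c) (2*j + 1 - 1) 0)])
      edges
    = edges ++ pvBchr c := by
  simp only [cyc_eq]
  exact inner_eq' c edges

-- ===== VERDICT (by name: the statement is the Claim_ definition above) =====
theorem ColoredEdges_spec : Claim_equal_ColoredEdges := by
  intro P _
  unfold Spec_ColoredEdges ColoredEdges ColoredEdges_alt
  have h : (fun (edges : List (Int × Int)) (c : List Int) =>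
      let nodes := ChromosomeToCycle c
      (PySem.List.pyRange 1 ((c.length : Int) + 1) 1).foldl
        (fun edges j =>
          if j = (c.length : Int) then
            edges ++ [(PySem.List.pyGetD nodes (2*j - 1) 0, PySem.List.pyGetD nodes 0 0)]
          else
            edges ++ [(PySem.List.pyGetD nodes (2*j - 1) 0, PySem.List.pyGetD nodes (2*j + 1 - 1) 0)])
        edges)
      = fun edges c => edges ++ pvBchr c := by
    funext edges c
    exact inner_eq c edges
  rw [h]
  rfl
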